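-- pv_equiv track=rewrite | github.com/kehan857/boss-conversation | demo_server.py | calculate_typing_delay
-- ===== SOURCE A (Python) =====
-- def calculate_typing_delay(text, segment_index):
--     """根据文本长度和段落位置计算合理的延迟时间"""
--     # 基础延迟
--     base_delay = 1000  # 毫秒
--
--     # 第一段回复通常较快
--     if segment_index == 0:
--         return base_delay
--
--     # 文本长度因素：每个字符增加一定延迟
--     length_factor = len(text) * 5
--
--     # 复杂度因素：特殊符号、数字等表示内容可能更复杂
--     complexity = sum(1 for char in text if char in '.,;:!?()[]{}0123456789') * 100
--
--     # 段落因素：中间段落通常需要更多思考时间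
--     segment_factor = 500 if 0 < segment_index < 3 else 0
--
--     # 计算总延迟，介于1.5-5秒之间
--     delay = base_delay + length_factor + complexity + segment_factor
--     return min(max(delay, 1500), 5000)
-- ===== SOURCE B (Python) =====
-- def calculate_typing_delay(text, segment_index):
--     """根据文本长度和段落位置计算合理的延迟时间"""
--     if segment_index == 0:
--         return 1000
--     specials = '.,;:!?()[]{}0123456789'
--     complexity = 100 * sum(text.count(c) for c in specials)
--     delay = 1000 + 5 * len(text) + complexity + (500 if 0 < segment_index < 3 else 0)
--     return min(max(delay, 1500), 5000)
-- ===== Notes on version B (the rewrite author's own statement) =====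
-- stated objective: idiomatic
-- what changed: The per-character membership-test pass over the text is replaced by a per-special-character tally (sum of text.count(c) over the 22 special characters), a different traversal that is equal because the special string has no duplicates.
import Mathlib
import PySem

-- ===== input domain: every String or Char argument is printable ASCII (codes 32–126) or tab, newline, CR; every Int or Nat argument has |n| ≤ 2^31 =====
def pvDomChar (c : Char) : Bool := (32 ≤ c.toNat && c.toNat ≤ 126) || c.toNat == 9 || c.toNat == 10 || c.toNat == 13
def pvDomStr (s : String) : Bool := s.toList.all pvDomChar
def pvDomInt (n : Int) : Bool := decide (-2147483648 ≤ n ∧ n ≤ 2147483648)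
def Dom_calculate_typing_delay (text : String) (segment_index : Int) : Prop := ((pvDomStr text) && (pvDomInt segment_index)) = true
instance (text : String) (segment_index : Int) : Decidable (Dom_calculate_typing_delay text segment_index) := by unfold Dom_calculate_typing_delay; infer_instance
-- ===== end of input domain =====

-- B replaces A's single membership-testing pass over the text with a per-special-character
-- tally (sum of text.count(c) over the special characters); same value, idiomatic restructuring.


-- ===== PORT A =====
def calculate_typing_delay (text : String) (segment_index : Int) : Int :=
  let base_delay : Int := 1000
  if segment_index == 0 then base_delay
  else
    let length_factor : Int := (text.toList.length : Int) * 5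
    -- sum(1 for char in text if char in '.,;:!?()[]{}0123456789') * 100
    let complexity : Int :=
      (text.toList.foldl
        (fun acc ch => if ch ∈ ".,;:!?()[]{}0123456789".toList then acc + 1 else acc) 0) * 100
    let segment_factor : Int := if 0 < segment_index ∧ segment_index < 3 then 500 else 0
    let delay := base_delay + length_factor + complexity + segment_factor
    min (max delay 1500) 5000

-- ===== PORT B =====
-- text.count(c) for the single character c is ported as List.count on the char list (exact).
def calculate_typing_delay_alt (text : String) (segment_index : Int) : Int :=
  if segment_index == 0 then 1000
  else
    let specials := ".,;:!?()[]{}0123456789".toList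
    let complexity : Int :=
      100 * specials.foldl (fun acc c => acc + (text.toList.count c : Int)) 0
    let delay := 1000 + 5 * (text.toList.length : Int) + complexity
      + (if 0 < segment_index ∧ segment_index < 3 then 500 else 0)
    min (max delay 1500) 5000

-- ===== PRECONDITION & SPEC =====
def Spec_calculate_typing_delay (text : String) (segment_index : Int) (out : Int) : Prop := out = calculate_typing_delay_alt text segment_index
instance (text : String) (segment_index : Int) (out : Int) : Decidable (Spec_calculate_typing_delay text segment_index out) := by unfold Spec_calculate_typing_delay; infer_instance

-- ===== CLAIM (what is proved, stated in full; the proofs are below) =====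
def Claim_equal_calculate_typing_delay : Prop := ∀ (text : String) (segment_index : Int), Dom_calculate_typing_delay text segment_index → Spec_calculate_typing_delay text segment_index (calculate_typing_delay text segment_index)

-- ===== LEMMAS AND PROOFS =====

-- In a duplicate-free list, the count of an element is its membership indicator.
theorem count_of_nodup (x : Char) (s : List Char) (h : s.Nodup) :
    (s.count x : Int) = if x ∈ s then 1 else 0 := by
  induction s with
  | nil => simp
  | cons c s' ih =>
      rcases List.nodup_cons.mp h with ⟨hc, hn⟩
      by_cases hx : x = c
      · subst hx
        have h0 : s'.count x = 0 := List.count_eq_zero_of_not_mem hc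
        simp [h0]
      · have hne : c ≠ x := fun h' => hx h'.symm
        simp [hx, hne, ih hn]

-- countP by membership in a duplicate-free list = sum over that list of per-element counts.
theorem countP_eq_sum_counts (l s : List Char) (hnd : s.Nodup) :
    ((l.countP (fun x => decide (x ∈ s))) : Int)
      = (s.map (fun c => (l.count c : Int))).sum := by
  induction l with
  | nil => simp
  | cons x t ih =>
      have hsum : (s.map (fun c => ((x :: t).count c : Int))).sum
          = (s.map (fun c => (t.count c : Int))).sum + (s.count x : Int) := by
        have h1 : ∀ c : Char, (((x :: t).count c) : Int)
            = (t.count c : Int) + (if c == x then 1 else 0) := by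
          intro c
          rcases eq_or_ne c x with h | h
          · subst h; simp
          · simp [h, h.symm]
        calc (s.map (fun c => ((x :: t).count c : Int))).sum
            = (s.map (fun c => (t.count c : Int) + (if c == x then 1 else 0))).sum := by
              simp only [h1]
          _ = (s.map (fun c => (t.count c : Int))).sum
              + (s.map (fun c => if c == x then (1:Int) else 0)).sum := by
              rw [PySem.List.sum_map_add_int]
          _ = (s.map (fun c => (t.count c : Int))).sum + (s.count x : Int) := by
              rw [PySem.List.sum_map_ite_one_zero]
              simp [List.count_eq_countP]
      rw [List.countP_cons, hsum]
      push_cast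
      rw [ih]
      by_cases hm : x ∈ s
      · rw [count_of_nodup x s hnd]; simp [hm]
      · rw [count_of_nodup x s hnd]; simp [hm]
-- ===== VERDICT (by name: the statement is the Claim_ definition above) =====
theorem calculate_typing_delay_spec : Claim_equal_calculate_typing_delay := by
  intro text segment_index _
  unfold Spec_calculate_typing_delay calculate_typing_delay calculate_typing_delay_alt
  by_cases h0 : segment_index == 0
  · simp [h0]
  · simp only [h0, Bool.false_eq_true, if_false]
    have hA := PySem.List.foldl_ite_add_one
      (l := text.toList) (p := fun ch => ch ∈ ".,;:!?()[]{}0123456789".toList) (a := (0 : Int))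
    have hB := PySem.List.foldl_add
      (l := ".,;:!?()[]{}0123456789".toList)
      (g := fun c => (text.toList.count c : Int)) (a := (0 : Int))
    rw [hA, hB, zero_add, zero_add,
      countP_eq_sum_counts text.toList _ (by decide)]
    ring_nf
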